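-- pv_equiv track=rewrite | github.com/juaquicar/GeoAgents | agents_gis/inference.py | _goal_kind_mentions
-- ===== SOURCE A (Python) =====
-- import unicodedata
-- from typing import Any, Dict, List, Optional, Sequence
--
-- GOAL_TERMS = {
--     "point": [
--         "punto", "puntos", "point", "points", "nodo", "nodos",
--         "cto", "cpe", "ont", "dispositivo", "dispositivos",
--     ],
--     "line": [
--         "linea", "línea", "lineas", "líneas", "line", "lines",
--         "tramo", "tramos", "segmento", "segmentos",
--         "cable", "cables", "ruta", "rutas",
--         "red", "network",
--     ],
--     "polygon": [
--         "zona", "zonas", "area", "areas", "poligono", "polígono",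
--         "poligonos", "polígonos", "polygon", "polygons",
--         "sector", "sectores", "parcela", "parcelas",
--     ],
-- }
--
-- def _normalize_text(value: Any) -> str:
--     text = str(value or "").strip().lower()
--     normalized = unicodedata.normalize("NFKD", text)
--     return "".join(ch for ch in normalized if not unicodedata.combining(ch))
--
-- def _goal_kind_mentions(goal: str) -> List[str]:
--     normalized_goal = _normalize_text(goal)
--     hits = []
--     for kind, terms in GOAL_TERMS.items():
--         positions = [normalized_goal.find(_normalize_text(term)) for term in terms]
--         positions = [pos for pos in positions if pos >= 0]
--         if positions:
--             hits.append((min(positions), kind))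
--     hits.sort(key=lambda item: item[0])
--     return [kind for _, kind in hits]
-- ===== SOURCE B (Python) =====
-- import unicodedata
-- from typing import List
--
-- GOAL_TERMS = {
--     "point": [
--         "punto", "puntos", "point", "points", "nodo", "nodos",
--         "cto", "cpe", "ont", "dispositivo", "dispositivos",
--     ],
--     "line": [
--         "linea", "línea", "lineas", "líneas", "line", "lines",
--         "tramo", "tramos", "segmento", "segmentos",
--         "cable", "cables", "ruta", "rutas",
--         "red", "network",
--     ],
--     "polygon": [
--         "zona", "zonas", "area", "areas", "poligono", "polígono",
--         "poligonos", "polígonos", "polygon", "polygons",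
--         "sector", "sectores", "parcela", "parcelas",
--     ],
-- }
--
--
-- def _norm(value) -> str:
--     text = str(value or "").strip().lower()
--     normalized = unicodedata.normalize("NFKD", text)
--     return "".join(ch for ch in normalized if not unicodedata.combining(ch))
--
--
-- def _goal_kind_mentions(goal: str) -> List[str]:
--     # Single left-to-right scan: the first position where any of a kind's terms
--     # starts is that kind's rank; no per-term find() and no sort needed.
--     s = _norm(goal)
--     pending = [(kind, [_norm(t) for t in terms]) for kind, terms in GOAL_TERMS.items()]
--     out: List[str] = []
--     for i in range(len(s)):
--         if not pending:
--             break
--         still = []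
--         for kind, terms in pending:
--             if any(s.startswith(t, i) for t in terms):
--                 out.append(kind)
--             else:
--                 still.append((kind, terms))
--         pending = still
--     return out
-- ===== Notes on version B (the rewrite author's own statement) =====
-- stated objective: alternative
-- what changed: Replaces the per-kind list of str.find calls plus filter/min and a final sort by a single left-to-right scan of the normalized goal that emits each kind the first time one of its terms starts at the current position, so the output order falls out of the scan and no sort or per-term find remains.
import Mathlib
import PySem

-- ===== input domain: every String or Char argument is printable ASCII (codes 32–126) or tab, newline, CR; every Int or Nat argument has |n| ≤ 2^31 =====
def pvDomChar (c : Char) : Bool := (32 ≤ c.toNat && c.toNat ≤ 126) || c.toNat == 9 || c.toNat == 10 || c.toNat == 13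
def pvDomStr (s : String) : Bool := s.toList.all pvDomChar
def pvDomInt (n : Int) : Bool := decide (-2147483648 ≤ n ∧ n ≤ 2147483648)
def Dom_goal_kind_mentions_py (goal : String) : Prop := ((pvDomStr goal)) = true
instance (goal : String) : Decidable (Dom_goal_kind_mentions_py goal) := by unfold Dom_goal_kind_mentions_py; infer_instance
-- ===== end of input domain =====

-- B replaces per-term find + filter/min + sort by one left-to-right scan emitting each kind at its first term hit (objective: alternative; return value only, no mutation involved).

-- ===== PORT A =====

-- unicodedata.normalize("NFKD", ·) followed by dropping combining marks: on the printable-ASCII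
-- domain it is the identity, and on the accented letters occurring in GOAL_TERMS it strips the accent.
def pyNfkdFold (c : Char) : List Char :=
  if c = 'í' then ['i'] else if c = 'ó' then ['o'] else [c]

-- _normalize_text: str(value or "").strip().lower(), then NFKD + combining-mark removal (exact as above)
def pyNormChars (value : String) : List Char :=
  (PySem.Chars.lower (PySem.Chars.strip (if value = "" then "" else value).toList)).flatMap pyNfkdFold

def pyGoalTerms : List (String × List String) :=
  [("point", ["punto", "puntos", "point", "points", "nodo", "nodos",
              "cto", "cpe", "ont", "dispositivo", "dispositivos"]),
   ("line", ["linea", "línea", "lineas", "líneas", "line", "lines",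
             "tramo", "tramos", "segmento", "segmentos",
             "cable", "cables", "ruta", "rutas",
             "red", "network"]),
   ("polygon", ["zona", "zonas", "area", "areas", "poligono", "polígono",
                "poligonos", "polígonos", "polygon", "polygons",
                "sector", "sectores", "parcela", "parcelas"])]

def goal_kind_mentions_py (goal : String) : List String :=
  let ng := pyNormChars goal
  let hits := pyGoalTerms.foldl (fun hits kt =>
      let positions := kt.2.map (fun t => PySem.Chars.find ng (pyNormChars t))
      let positions := positions.filter (fun p => decide (0 ≤ p))
      if positions ≠ [] then
        hits ++ [(((PySem.List.min? positions (fun x => x)).getD 0), kt.1)]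
      else hits) ([] : List (Int × String))
  (PySem.List.sorted hits (fun it => it.1) false).map (fun it => it.2)

-- ===== PORT B =====

def altLoop : List Char → List (String × List (List Char)) → List String → List String
  | _, [], out => out
  | [], _ :: _, out => out
  | c :: r, p1 :: p, out =>
      let part := (p1 :: p).partition (fun kt => kt.2.any (fun t => t.isPrefixOf (c :: r)))
      altLoop r part.2 (out ++ part.1.map Prod.fst)

def goal_kind_mentions_py_alt (goal : String) : List String :=
  let s := pyNormChars goal
  altLoop s (pyGoalTerms.map (fun kt => (kt.1, kt.2.map (fun t => pyNormChars t)))) []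

-- ===== PRECONDITION & SPEC =====
def Spec_goal_kind_mentions_py (goal : String) (out : List String) : Prop := out = goal_kind_mentions_py_alt goal
instance (goal : String) (out : List String) : Decidable (Spec_goal_kind_mentions_py goal out) := by unfold Spec_goal_kind_mentions_py; infer_instance

-- ===== CLAIM (what is proved, stated in full; the proofs are below) =====
def Claim_equal_goal_kind_mentions_py : Prop := ∀ (goal : String), Dom_goal_kind_mentions_py goal → Spec_goal_kind_mentions_py goal (goal_kind_mentions_py goal)

-- ===== LEMMAS AND PROOFS =====

def fpos1 : List Char → List Char → Option Nat
  | _, [] => none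
  | t, c :: r => if t.isPrefixOf (c :: r) then some 0 else (fpos1 t r).map (· + 1)

def fposSet : List (List Char) → List Char → Option Nat
  | _, [] => none
  | ts, c :: r => if ts.any (fun t => t.isPrefixOf (c :: r)) then some 0 else (fposSet ts r).map (· + 1)

theorem go_eq (t : List Char) (ht : t ≠ []) :
    ∀ (s : List Char) (k : Nat), PySem.Chars.find.go t s k = (fpos1 t s).elim (-1) (fun p => (k : Int) + p)
  | [], k => by
    simp [PySem.Chars.find.go, fpos1, List.isEmpty_iff, ht]
  | c :: r, k => by
    rw [PySem.Chars.find.go]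
    by_cases hp : t.isPrefixOf (c :: r)
    · simp [hp, fpos1]
    · simp only [hp, fpos1, Bool.false_eq_true, ite_false]
      rw [go_eq t ht r (k+1)]
      cases fpos1 t r
      · simp
      · simp
        ring

theorem find_eq (t s : List Char) (ht : t ≠ []) :
    PySem.Chars.find s t = (fpos1 t s).elim (-1) (fun p => (p : Int)) := by
  have := go_eq t ht s 0
  simpa [PySem.Chars.find] using this

theorem min_foldl_map {α β : Type} [LT α] [DecidableLT α] [LT β] [DecidableLT β]
    (f : α → β) (hf : ∀ a b : α, decide (f a < f b) = decide (a < b)) :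
    ∀ (xs : List α) (acc : Option α),
      (xs.map f).foldl (fun acc x => match acc with
        | none => some x
        | some m => if x < m then some x else some m) (acc.map f)
      = (xs.foldl (fun acc x => match acc with
        | none => some x
        | some m => if x < m then some x else some m) acc).map f
  | [], acc => rfl
  | x :: xs, acc => by
    cases acc with
    | none => simpa using min_foldl_map f hf xs (some x)
    | some m =>
      have hiff : f x < f m ↔ x < m := decide_eq_decide.mp (hf x m)
      by_cases h : x < m
      · simp [h, hiff.mpr h]
        exact min_foldl_map f hf xs (some x)
      · have h2 : ¬ f x < f m := fun hc => h (hiff.mp hc)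
        simp [h, h2]
        exact min_foldl_map f hf xs (some m)

theorem min?_map {α β : Type} [LT α] [DecidableLT α] [LT β] [DecidableLT β]
    (f : α → β) (hf : ∀ a b : α, decide (f a < f b) = decide (a < b)) (xs : List α) :
    PySem.List.min? (xs.map f) (fun x => x) = (PySem.List.min? xs (fun x => x)).map f := by
  have := min_foldl_map f hf xs none
  simpa [PySem.List.min?] using this

theorem filterMap_fpos1_succ (ts : List (List Char)) (c : Char) (r : List Char)
    (h : ∀ t ∈ ts, t.isPrefixOf (c :: r) = false) :
    ts.filterMap (fun t => fpos1 t (c :: r)) = (ts.filterMap (fun t => fpos1 t r)).map (· + 1) := by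
  induction ts with
  | nil => rfl
  | cons t ts ih =>
    have ht := h t (List.mem_cons_self)
    have ih' := ih (fun u hu => h u (List.mem_cons_of_mem _ hu))
    simp only [List.filterMap_cons]
    rw [show fpos1 t (c :: r) = (fpos1 t r).map (· + 1) by simp [fpos1, ht]]
    cases fpos1 t r <;> simp [ih']

theorem fposSet_eq (ts : List (List Char)) :
    ∀ s : List Char, PySem.List.min? (ts.filterMap (fun t => fpos1 t s)) (fun x => x) = fposSet ts s
  | [] => by simp [fpos1, fposSet, PySem.List.min?]
  | c :: r => by
    by_cases hb : ts.any (fun t => t.isPrefixOf (c :: r))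
    · obtain ⟨t, ht, hp⟩ := List.any_eq_true.mp hb
      have h0 : (0 : Nat) ∈ ts.filterMap (fun t => fpos1 t (c :: r)) := by
        exact List.mem_filterMap.mpr ⟨t, ht, by simp [fpos1, hp]⟩
      have hne : ts.filterMap (fun t => fpos1 t (c :: r)) ≠ [] := by
        intro hc; rw [hc] at h0; exact (List.not_mem_nil h0)
      cases hm : PySem.List.min? (ts.filterMap (fun t => fpos1 t (c :: r))) (fun x => x) with
      | none => exact absurd ((PySem.List.min?_eq_none_iff _ _).mp hm) hne
      | some m =>
        have := PySem.List.min?_isMin hm 0 h0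
        simp [fposSet, hb]
        omega
    · have hall : ∀ t ∈ ts, t.isPrefixOf (c :: r) = false := by
        intro t ht
        by_contra hc
        exact hb (List.any_eq_true.mpr ⟨t, ht, by simpa using hc⟩)
      rw [filterMap_fpos1_succ ts c r hall,
        min?_map (fun n : Nat => n + 1) (by intro a b; simp) _,
        fposSet_eq ts r]
      simp [fposSet, hb]

def optEN (o : Option Nat) (k : String) : List (Nat × String) :=
  o.elim [] (fun p => [(p, k)])

theorem filt_eq (ts : List (List Char)) (s : List Char) (h : ∀ t ∈ ts, t ≠ []) :
    (ts.map (fun t => PySem.Chars.find s t)).filter (fun p => decide (0 ≤ p))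
    = (ts.filterMap (fun t => fpos1 t s)).map (fun n : Nat => (n : Int)) := by
  induction ts with
  | nil => rfl
  | cons t ts ih =>
    have ih' := ih (fun u hu => h u (List.mem_cons_of_mem _ hu))
    rw [List.map_cons, List.filterMap_cons, find_eq t s (h t List.mem_cons_self)]
    cases hv : fpos1 t s with
    | none => simpa [hv] using ih'
    | some p => simpa [hv] using ih'

theorem kind_step (tsS : List String) (kind : String) (hits : List (Int × String)) (s : List Char)
    (hne : ∀ t ∈ tsS.map pyNormChars, t ≠ []) :
    (if (tsS.map (fun t => PySem.Chars.find s (pyNormChars t))).filter (fun p => decide (0 ≤ p)) ≠ [] then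
        hits ++ [(((PySem.List.min? ((tsS.map (fun t => PySem.Chars.find s (pyNormChars t))).filter
          (fun p => decide (0 ≤ p))) (fun x => x)).getD 0), kind)]
      else hits)
    = hits ++ (optEN (fposSet (tsS.map pyNormChars) s) kind).map (fun x => ((x.1 : Int), x.2)) := by
  have hmm : tsS.map (fun t => PySem.Chars.find s (pyNormChars t))
      = (tsS.map pyNormChars).map (fun t => PySem.Chars.find s t) := by
    simp [List.map_map]
  rw [hmm, filt_eq _ s hne]
  have hcast := min?_map (fun n : Nat => (n : Int)) (by intro a b; simp) 
      ((tsS.map pyNormChars).filterMap (fun t => fpos1 t s))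
  cases hfs : fposSet (tsS.map pyNormChars) s with
  | none =>
    have : (tsS.map pyNormChars).filterMap (fun t => fpos1 t s) = [] := by
      have := fposSet_eq (tsS.map pyNormChars) s
      rw [hfs] at this
      exact (PySem.List.min?_eq_none_iff _ _).mp this
    simp [this, optEN]
  | some p =>
    have hmin : PySem.List.min? ((tsS.map pyNormChars).filterMap (fun t => fpos1 t s)) (fun x => x) = some p := by
      rw [fposSet_eq, hfs]
    have hne2 : (tsS.map pyNormChars).filterMap (fun t => fpos1 t s) ≠ [] := by
      intro hc; rw [hc] at hmin; simp [PySem.List.min?] at hmin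
    rw [hmin] at hcast
    have hne3 : ((tsS.map pyNormChars).filterMap (fun t => fpos1 t s)).map (fun n : Nat => (n : Int)) ≠ [] := by
      simpa using hne2
    rw [if_pos hne3, hcast]
    simp [optEN]

theorem insertBy_map {α β : Type} (f : α → β) (ba : α → α → Bool) (bb : β → β → Bool)
    (hf : ∀ x y, bb (f x) (f y) = ba x y) (x : α) :
    ∀ ys : List α, PySem.List.insertBy bb (f x) (ys.map f) = (PySem.List.insertBy ba x ys).map f
  | [] => by simp [PySem.List.insertBy]
  | y :: ys => by
    rw [List.map_cons, PySem.List.insertBy, PySem.List.insertBy, hf]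
    cases hb : ba x y <;> simp [insertBy_map f ba bb hf x ys]

theorem foldl_insertBy_map {α β : Type} (f : α → β) (ba : α → α → Bool) (bb : β → β → Bool)
    (hf : ∀ x y, bb (f x) (f y) = ba x y) :
    ∀ (xs : List α) (acc : List α),
      (xs.map f).foldl (fun acc x => PySem.List.insertBy bb x acc) (acc.map f)
      = (xs.foldl (fun acc x => PySem.List.insertBy ba x acc) acc).map f
  | [], acc => rfl
  | x :: xs, acc => by
    rw [List.map_cons, List.foldl_cons, List.foldl_cons, insertBy_map f ba bb hf x acc]
    exact foldl_insertBy_map f ba bb hf xs _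

theorem sorted_fst_map {κ κ' : Type} [LT κ] [DecidableLT κ] [LT κ'] [DecidableLT κ']
    (g : κ → κ') (hg : ∀ a b : κ, decide (g a < g b) = decide (a < b)) (xs : List (κ × String)) :
    PySem.List.sorted (xs.map (fun x => (g x.1, x.2))) (fun it => it.1) false
    = (PySem.List.sorted xs (fun it => it.1) false).map (fun x => (g x.1, x.2)) := by
  rw [PySem.List.sorted_eq_foldl_insertBy, PySem.List.sorted_eq_foldl_insertBy]
  exact foldl_insertBy_map (fun x => (g x.1, x.2))
    (fun a b => decide (a.1 < b.1)) (fun a b => decide (a.1 < b.1))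
    (fun x y => by simpa using hg x.1 y.1) xs []

theorem insertBy_append_left {α : Type} (before : α → α → Bool) (x : α) :
    ∀ (Z W : List α), (∀ z ∈ Z, before x z = false) →
      PySem.List.insertBy before x (Z ++ W) = Z ++ PySem.List.insertBy before x W
  | [], W, _ => rfl
  | z :: Z, W, h => by
    rw [List.cons_append, PySem.List.insertBy, h z List.mem_cons_self]
    simp only [Bool.false_eq_true, if_false, List.cons_append]
    rw [insertBy_append_left before x Z W (fun u hu => h u (List.mem_cons_of_mem _ hu))]

theorem stable_zero_front :
    ∀ (xs Z W : List (Nat × String)), (∀ z ∈ Z, z.1 = 0) → (∀ w ∈ W, w.1 ≠ 0) →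
      xs.foldl (fun acc x => PySem.List.insertBy (fun a b => decide (a.1 < b.1)) x acc) (Z ++ W)
      = (Z ++ xs.filter (fun x => x.1 == 0))
        ++ (xs.filter (fun x => !(x.1 == 0))).foldl
            (fun acc x => PySem.List.insertBy (fun a b => decide (a.1 < b.1)) x acc) W
  | [], Z, W, hZ, hW => by simp
  | x :: xs, Z, W, hZ, hW => by
    have hxz : ∀ z ∈ Z, (fun a b : Nat × String => decide (a.1 < b.1)) x z = false := by
      intro z hz
      simp [hZ z hz]
    by_cases hx : x.1 = 0
    · have hins : PySem.List.insertBy (fun a b : Nat × String => decide (a.1 < b.1)) x (Z ++ W)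
          = (Z ++ [x]) ++ W := by
        rw [insertBy_append_left _ x Z W hxz]
        cases W with
        | nil => simp [PySem.List.insertBy]
        | cons w W' =>
          have hlt : x.1 < w.1 := by
            have := hW w List.mem_cons_self
            omega
          simp [PySem.List.insertBy, hlt]
      rw [List.foldl_cons, hins,
        stable_zero_front xs (Z ++ [x]) W
          (by intro z hz; rcases List.mem_append.mp hz with h | h
              · exact hZ z h
              · simp at h; subst h; exact hx) hW]
      simp [hx]
    · have hins : PySem.List.insertBy (fun a b : Nat × String => decide (a.1 < b.1)) x (Z ++ W)
          = Z ++ PySem.List.insertBy (fun a b : Nat × String => decide (a.1 < b.1)) x W := by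
        exact insertBy_append_left _ x Z W hxz
      rw [List.foldl_cons, hins,
        stable_zero_front xs Z _ hZ
          (by intro w hw
              rcases (PySem.List.mem_insertBy _ _ _ _).mp hw with h | h
              · subst h; exact hx
              · exact hW w h)]
      simp [hx]

theorem sorted_zero_front (xs : List (Nat × String)) :
    PySem.List.sorted xs (fun it => it.1) false
    = xs.filter (fun x => x.1 == 0)
      ++ PySem.List.sorted (xs.filter (fun x => !(x.1 == 0))) (fun it => it.1) false := by
  rw [PySem.List.sorted_eq_foldl_insertBy, PySem.List.sorted_eq_foldl_insertBy]
  simpa using stable_zero_front xs [] [] (by simp) (by simp)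

theorem hits_filter_zero (c : Char) (r : List Char) :
    ∀ P : List (String × List (List Char)),
      (P.filterMap (fun kt => (fposSet kt.2 (c :: r)).map (fun p => (p, kt.1)))).filter
          (fun x => x.1 == 0)
      = (P.filter (fun kt => kt.2.any (fun t => t.isPrefixOf (c :: r)))).map (fun kt => (0, kt.1))
  | [] => rfl
  | kt :: P => by
    cases hp : kt.2.any (fun t => t.isPrefixOf (c :: r)) with
    | true =>
      rw [List.filterMap_cons, show fposSet kt.2 (c :: r) = some 0 by simp [fposSet, hp]]
      simpa [hp] using hits_filter_zero c r P
    | false =>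
      rw [List.filterMap_cons, show fposSet kt.2 (c :: r) = (fposSet kt.2 r).map (· + 1) by
        simp [fposSet, hp]]
      cases hv : fposSet kt.2 r with
      | none => simpa [hv, hp] using hits_filter_zero c r P
      | some p => simpa [hv, hp] using hits_filter_zero c r P

theorem hits_filter_pos (c : Char) (r : List Char) :
    ∀ P : List (String × List (List Char)),
      (P.filterMap (fun kt => (fposSet kt.2 (c :: r)).map (fun p => (p, kt.1)))).filter
          (fun x => !(x.1 == 0))
      = ((P.filter (fun kt => !(kt.2.any (fun t => t.isPrefixOf (c :: r))))).filterMap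
          (fun kt => (fposSet kt.2 r).map (fun p => (p, kt.1)))).map (fun x => (x.1 + 1, x.2))
  | [] => rfl
  | kt :: P => by
    cases hp : kt.2.any (fun t => t.isPrefixOf (c :: r)) with
    | true =>
      rw [List.filterMap_cons, show fposSet kt.2 (c :: r) = some 0 by simp [fposSet, hp]]
      simpa [hp] using hits_filter_pos c r P
    | false =>
      rw [List.filterMap_cons, show fposSet kt.2 (c :: r) = (fposSet kt.2 r).map (· + 1) by
        simp [fposSet, hp]]
      cases hv : fposSet kt.2 r with
      | none => simpa [hv, hp, List.filterMap_cons] using hits_filter_pos c r P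
      | some p => simpa [hv, hp, List.filterMap_cons] using hits_filter_pos c r P

theorem altLoop_eq :
    ∀ (s : List Char) (P : List (String × List (List Char))) (acc : List String),
      altLoop s P acc
      = acc ++ (PySem.List.sorted
          (P.filterMap (fun kt => (fposSet kt.2 s).map (fun p => (p, kt.1))))
          (fun it => it.1) false).map Prod.snd
  | s, [], acc => by cases s <;> simp [altLoop, PySem.List.sorted]
  | [], p1 :: P, acc => by
    simp [altLoop, fposSet, PySem.List.sorted]
  | c :: r, p1 :: P, acc => by
    rw [altLoop]
    rw [List.partition_eq_filter_filter]
    rw [altLoop_eq r _ _]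
    rw [sorted_zero_front ((p1 :: P).filterMap
        (fun kt => (fposSet kt.2 (c :: r)).map (fun p => (p, kt.1))))]
    rw [hits_filter_zero c r (p1 :: P), hits_filter_pos c r (p1 :: P)]
    rw [sorted_fst_map (fun n : Nat => n + 1) (by intro a b; simp) _]
    simp [List.map_map, Function.comp_def]

theorem hne_point : ∀ t ∈ (["punto", "puntos", "point", "points", "nodo", "nodos",
    "cto", "cpe", "ont", "dispositivo", "dispositivos"] : List String).map pyNormChars, t ≠ [] := by
  decide

theorem hne_line : ∀ t ∈ (["linea", "línea", "lineas", "líneas", "line", "lines",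
    "tramo", "tramos", "segmento", "segmentos", "cable", "cables", "ruta", "rutas",
    "red", "network"] : List String).map pyNormChars, t ≠ [] := by
  decide

theorem hne_poly : ∀ t ∈ (["zona", "zonas", "area", "areas", "poligono", "polígono",
    "poligonos", "polígonos", "polygon", "polygons",
    "sector", "sectores", "parcela", "parcelas"] : List String).map pyNormChars, t ≠ [] := by
  decide

def hitsN (s : List Char) : List (Nat × String) :=
  optEN (fposSet ((["punto", "puntos", "point", "points", "nodo", "nodos",
      "cto", "cpe", "ont", "dispositivo", "dispositivos"] : List String).map pyNormChars) s) "point"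
  ++ optEN (fposSet ((["linea", "línea", "lineas", "líneas", "line", "lines",
      "tramo", "tramos", "segmento", "segmentos", "cable", "cables", "ruta", "rutas",
      "red", "network"] : List String).map pyNormChars) s) "line"
  ++ optEN (fposSet ((["zona", "zonas", "area", "areas", "poligono", "polígono",
      "poligonos", "polígonos", "polygon", "polygons",
      "sector", "sectores", "parcela", "parcelas"] : List String).map pyNormChars) s) "polygon"

theorem A_char (goal : String) :
    goal_kind_mentions_py goal
    = (PySem.List.sorted (hitsN (pyNormChars goal)) (fun it => it.1) false).map Prod.snd := by
  simp only [goal_kind_mentions_py, pyGoalTerms, List.foldl_cons, List.foldl_nil]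
  rw [kind_step _ _ _ _ hne_point, kind_step _ _ _ _ hne_line, kind_step _ _ _ _ hne_poly]
  rw [List.nil_append, ← List.map_append, ← List.map_append]
  rw [show (fun x : Nat × String => ((x.1 : Int), x.2))
      = (fun x : Nat × String => ((fun n : Nat => (n : Int)) x.1, x.2)) from rfl]
  rw [sorted_fst_map (fun n : Nat => (n : Int)) (by intro a b; simp)]
  simp [hitsN, List.map_map, Function.comp_def]

theorem B_char (goal : String) :
    goal_kind_mentions_py_alt goal
    = (PySem.List.sorted (hitsN (pyNormChars goal)) (fun it => it.1) false).map Prod.snd := by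
  simp only [goal_kind_mentions_py_alt]
  rw [altLoop_eq, List.nil_append]
  congr 2
  rw [List.filterMap_map]
  simp only [pyGoalTerms, Function.comp_def, List.filterMap_cons, List.filterMap_nil]
  cases h1 : fposSet [pyNormChars "punto", pyNormChars "puntos", pyNormChars "point", pyNormChars "points", pyNormChars "nodo", pyNormChars "nodos", pyNormChars "cto", pyNormChars "cpe", pyNormChars "ont", pyNormChars "dispositivo", pyNormChars "dispositivos"] (pyNormChars goal) <;>
    cases h2 : fposSet [pyNormChars "linea", pyNormChars "línea", pyNormChars "lineas", pyNormChars "líneas", pyNormChars "line", pyNormChars "lines", pyNormChars "tramo", pyNormChars "tramos", pyNormChars "segmento", pyNormChars "segmentos", pyNormChars "cable", pyNormChars "cables", pyNormChars "ruta", pyNormChars "rutas", pyNormChars "red", pyNormChars "network"] (pyNormChars goal) <;>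
    cases h3 : fposSet [pyNormChars "zona", pyNormChars "zonas", pyNormChars "area", pyNormChars "areas", pyNormChars "poligono", pyNormChars "polígono", pyNormChars "poligonos", pyNormChars "polígonos", pyNormChars "polygon", pyNormChars "polygons", pyNormChars "sector", pyNormChars "sectores", pyNormChars "parcela", pyNormChars "parcelas"] (pyNormChars goal) <;>
    simp [hitsN, optEN, h1, h2, h3]

-- ===== VERDICT (by name: the statement is the Claim_ definition above) =====
theorem goal_kind_mentions_py_spec : Claim_equal_goal_kind_mentions_py := by
  intro goal _
  unfold Spec_goal_kind_mentions_py
  rw [A_char, B_char]
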